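-- pv_equiv track=rewrite | github.com/koohw/Algorithm | Python3/프로그래머스/1/42862. 체육복/체육복.py | solution
-- ===== SOURCE A (Python) =====
-- def solution(n, lost, reserve):
--     answer = []
--
--     common = set(lost) & set(reserve)
--     lost = sorted(list(set(lost) - common))
--     reserve = sorted(list(set(reserve) - common))
--
--     for num in range(1, n + 1):
--         if num not in lost:
--             answer.append(num)
--
--     for r in reserve:   # 빌려주는 사람
--         if r - 1 in lost:
--             answer.append(r-1)
--             lost.remove(r-1)
--         elif r + 1 in lost:
--             answer.append(r+1)
--             lost.remove(r+1)
--
--     return len(set(answer))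
-- ===== SOURCE B (Python) =====
-- def solution(n, lost, reserve):
--     ls, rs = set(lost), set(reserve)
--     L = sorted(ls - rs)
--     R = sorted(rs - ls)
--     attend = max(n, 0) - sum(1 for x in L if 1 <= x <= n)
--     i = j = 0
--     while i < len(L) and j < len(R):
--         if L[i] < R[j] - 1:
--             i += 1
--         elif L[i] > R[j] + 1:
--             j += 1
--         else:
--             attend += 1
--             i += 1
--             j += 1
--     return attend
-- ===== Notes on version B (the rewrite author's own statement) =====
-- stated objective: faster
-- what changed: Replaces A's O(n) range loop with list membership tests and the remove-based greedy over reserves by an arithmetic attendance count plus a single two-pointer sweep over the two sorted deduplicated lists.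
import Mathlib
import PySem

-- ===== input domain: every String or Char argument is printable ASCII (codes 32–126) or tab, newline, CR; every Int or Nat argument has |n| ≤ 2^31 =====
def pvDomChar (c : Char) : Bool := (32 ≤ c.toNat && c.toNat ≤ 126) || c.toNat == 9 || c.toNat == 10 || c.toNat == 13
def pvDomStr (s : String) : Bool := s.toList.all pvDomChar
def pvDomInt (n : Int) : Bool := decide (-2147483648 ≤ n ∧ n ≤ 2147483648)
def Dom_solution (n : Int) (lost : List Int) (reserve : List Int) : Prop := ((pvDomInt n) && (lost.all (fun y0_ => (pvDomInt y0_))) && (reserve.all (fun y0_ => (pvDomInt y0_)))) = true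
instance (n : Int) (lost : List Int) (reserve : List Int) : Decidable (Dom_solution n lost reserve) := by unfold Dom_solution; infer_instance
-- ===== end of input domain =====

-- B replaces A's per-student range scan with list membership and A's remove-based
-- greedy by an arithmetic attendance count plus a two-pointer sweep of the two sorted lists.

-- ===== PORT A =====
def solution (n : Int) (lost : List Int) (reserve : List Int) : Int :=
  let common := PySem.Set.inter (PySem.Set.ofList lost) (PySem.Set.ofList reserve)
  let lost2 := PySem.List.sorted (PySem.Set.diff (PySem.Set.ofList lost) common) (fun x => x) false
  let reserve2 := PySem.List.sorted (PySem.Set.diff (PySem.Set.ofList reserve) common) (fun x => x) false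
  let answer := (PySem.List.pyRange 1 (n + 1) 1).foldl
    (fun acc num => if num ∈ lost2 then acc else acc ++ [num]) []
  let st := reserve2.foldl
    (fun st r =>
      if (r - 1) ∈ st.2 then (st.1 ++ [r - 1], (PySem.List.remove? st.2 (r - 1)).getD st.2)
      else if (r + 1) ∈ st.2 then (st.1 ++ [r + 1], (PySem.List.remove? st.2 (r + 1)).getD st.2)
      else st)
    (answer, lost2)
  ((PySem.Set.ofList st.1).length : Int)

-- ===== PORT B =====
-- the while loop of Source B: two index pointers into L and R
-- (total rendering of the while loop: the fuel bounds the number of iterations,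
-- each iteration advances i or j, so L.length + R.length fuel is always enough)
def tpGo (L R : List Int) : Nat → Nat → Nat → Int → Int
  | 0, _, _, acc => acc
  | fuel + 1, i, j, acc =>
    if h : i < L.length ∧ j < R.length then
      if L[i] < R[j] - 1 then tpGo L R fuel (i + 1) j acc
      else if L[i] > R[j] + 1 then tpGo L R fuel i (j + 1) acc
      else tpGo L R fuel (i + 1) (j + 1) (acc + 1)
    else acc

def solution_alt (n : Int) (lost : List Int) (reserve : List Int) : Int :=
  let ls := PySem.Set.ofList lost
  let rs := PySem.Set.ofList reserve
  let L := PySem.List.sorted (PySem.Set.diff ls rs) (fun x => x) false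
  let R := PySem.List.sorted (PySem.Set.diff rs ls) (fun x => x) false
  let attend := max n 0 - L.foldl (fun a x => if 1 ≤ x ∧ x ≤ n then a + 1 else a) 0
  tpGo L R (L.length + R.length) 0 0 attend

-- ===== PRECONDITION & SPEC =====
def Spec_solution (n : Int) (lost : List Int) (reserve : List Int) (out : Int) : Prop := out = solution_alt n lost reserve
instance (n : Int) (lost : List Int) (reserve : List Int) (out : Int) : Decidable (Spec_solution n lost reserve out) := by unfold Spec_solution; infer_instance

-- ===== CLAIM (what is proved, stated in full; the proofs are below) =====
def Claim_equal_solution : Prop := ∀ (n : Int) (lost : List Int) (reserve : List Int), Dom_solution n lost reserve → Spec_solution n lost reserve (solution n lost reserve)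

-- ===== LEMMAS AND PROOFS =====

-- abstract count of A's greedy over the reserve list
def gcount : List Int → List Int → Nat
  | [], _ => 0
  | r :: rs, L =>
    if (r - 1) ∈ L then 1 + gcount rs (L.erase (r - 1))
    else if (r + 1) ∈ L then 1 + gcount rs (L.erase (r + 1))
    else gcount rs L

-- suffix form of the two-pointer loop
def tpc : List Int → List Int → Int
  | l :: ls, r :: rs =>
    if l < r - 1 then tpc ls (r :: rs)
    else if l > r + 1 then tpc (l :: ls) rs
    else 1 + tpc ls rs
  | _, _ => 0
termination_by L R => L.length + R.length

theorem gcount_nil (R : List Int) : gcount R [] = 0 := by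
  induction R with
  | nil => rfl
  | cons r rs ih => simp [gcount, ih]

theorem gcount_skip_min (R : List Int) (l : Int) (hm : ∀ r ∈ R, l + 1 < r) :
    ∀ ls : List Int, gcount R (l :: ls) = gcount R ls := by
  induction R with
  | nil => intro ls; rfl
  | cons r rs ih =>
    intro ls
    have hr := hm r (by simp)
    have h1 : (r - 1) ∈ l :: ls ↔ (r - 1) ∈ ls := by
      simp [List.mem_cons]; intro h; omega
    have h2 : (r + 1) ∈ l :: ls ↔ (r + 1) ∈ ls := by
      simp [List.mem_cons]; intro h; omega
    have e1 : (l :: ls).erase (r - 1) = l :: ls.erase (r - 1) := by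
      rw [List.erase_cons_tail]; simp; omega
    have e2 : (l :: ls).erase (r + 1) = l :: ls.erase (r + 1) := by
      rw [List.erase_cons_tail]; simp; omega
    have hm' : ∀ r' ∈ rs, l + 1 < r' := fun r' h => hm r' (by simp [h])
    by_cases c1 : (r - 1) ∈ ls
    · simp [gcount, h1.mpr c1, c1, e1, ih hm']
    · by_cases c2 : (r + 1) ∈ ls
      · simp [gcount, h1, c1, h2, c2, e2, ih hm']
      · simp [gcount, h1, c1, h2, c2, ih hm']

theorem gcount_eq_tpc (L R : List Int)
    (hL : L.Pairwise (· < ·)) (hR : R.Pairwise (· < ·))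
    (hd : ∀ x ∈ L, x ∉ R) : (gcount R L : Int) = tpc L R := by
  match L, R with
  | [], R => cases R <;> simp [tpc, gcount_nil]
  | l :: ls, [] => simp [gcount, tpc]
  | l :: ls, r :: rs =>
    rw [List.pairwise_cons] at hL hR
    obtain ⟨hlmin, hLs⟩ := hL
    obtain ⟨hrmin, hRs⟩ := hR
    by_cases c1 : l < r - 1
    · -- l too small: never matched
      have hm : ∀ r' ∈ r :: rs, l + 1 < r' := by
        intro r' hr'; rcases List.mem_cons.mp hr' with h | h
        · omega
        · have := hrmin r' h; omega
      have hd' : ∀ x ∈ ls, x ∉ r :: rs := fun x hx => hd x (by simp [hx])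
      rw [gcount_skip_min _ _ hm]
      rw [gcount_eq_tpc ls (r :: rs) hLs (List.pairwise_cons.mpr ⟨hrmin, hRs⟩) hd']
      rw [tpc]; simp [c1]
    · by_cases c2 : l > r + 1
      · -- r matches nothing: everything in L is > r+1
        have hmem : ∀ x, x ∈ l :: ls → l ≤ x := by
          intro x hx; rcases List.mem_cons.mp hx with h | h
          · omega
          · have := hlmin x h; omega
        have n1 : (r - 1) ∉ l :: ls := fun h => by have := hmem _ h; omega
        have n2 : (r + 1) ∉ l :: ls := fun h => by have := hmem _ h; omega
        have hd' : ∀ x ∈ l :: ls, x ∉ rs := by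
          intro x hx h; exact hd x hx (by simp [h])
        rw [gcount, if_neg n1, if_neg n2]
        rw [gcount_eq_tpc (l :: ls) rs (List.pairwise_cons.mpr ⟨hlmin, hLs⟩) hRs hd']
        rw [tpc]; simp [c1, c2]
      · -- adjacent: l = r-1 or l = r+1 (l ≠ r by disjointness)
        have hne : l ≠ r := fun h => hd l (by simp) (by simp [h])
        have hd' : ∀ x ∈ ls, x ∉ rs := by
          intro x hx h; exact hd x (by simp [hx]) (by simp [h])
        rcases (by omega : l = r - 1 ∨ l = r + 1) with h | h
        · have m1 : (r - 1) ∈ l :: ls := by simp [h]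
          have e1 : (l :: ls).erase (r - 1) = ls := by rw [← h]; simp
          rw [gcount, if_pos m1, e1]
          rw [tpc]; simp only [if_neg c1, if_neg c2]
          rw [← gcount_eq_tpc ls rs hLs hRs hd']
          push_cast; ring
        · have n1 : (r - 1) ∉ l :: ls := by
            intro hx; rcases List.mem_cons.mp hx with hh | hh
            · omega
            · have := hlmin _ hh; omega
          have m2 : (r + 1) ∈ l :: ls := by simp [h]
          have e2 : (l :: ls).erase (r + 1) = ls := by rw [← h]; simp
          rw [gcount, if_neg n1, if_pos m2, e2]
          rw [tpc]; simp only [if_neg c1, if_neg c2]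
          rw [← gcount_eq_tpc ls rs hLs hRs hd']
          push_cast; ring
termination_by L.length + R.length

theorem tpc_nil_right (xs : List Int) : tpc xs [] = 0 := by
  cases xs <;> simp [tpc]

theorem tpGo_eq_tpc (L R : List Int) : ∀ (fuel i j : Nat) (acc : Int),
    (L.length - i) + (R.length - j) ≤ fuel →
    tpGo L R fuel i j acc = acc + tpc (L.drop i) (R.drop j) := by
  intro fuel
  induction fuel with
  | zero =>
    intro i j acc hf
    have h1 : L.length ≤ i := by omega
    have h2 : R.length ≤ j := by omega
    rw [tpGo, List.drop_eq_nil_of_le h2, tpc_nil_right]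
    ring
  | succ fuel ih =>
    intro i j acc hf
    rw [tpGo]
    by_cases h : i < L.length ∧ j < R.length
    · rw [dif_pos h]
      have hd1 : L.drop i = L[i] :: L.drop (i + 1) := List.drop_eq_getElem_cons h.1
      have hd2 : R.drop j = R[j] :: R.drop (j + 1) := List.drop_eq_getElem_cons h.2
      rw [hd1, hd2, tpc]
      by_cases c1 : L[i] < R[j] - 1
      · rw [if_pos c1, if_pos c1, ih _ _ _ (by omega), hd2]
      · rw [if_neg c1, if_neg c1]
        by_cases c2 : L[i] > R[j] + 1
        · rw [if_pos c2, if_pos c2, ih _ _ _ (by omega), hd1]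
        · rw [if_neg c2, if_neg c2, ih _ _ _ (by omega)]; ring
    · rw [dif_neg h]
      have : L.length ≤ i ∨ R.length ≤ j := by omega
      rcases this with hh | hh
      · rw [List.drop_eq_nil_of_le hh]; cases R.drop j <;> simp [tpc]
      · rw [List.drop_eq_nil_of_le hh, tpc_nil_right]; ring

theorem nodup_app_one {ans : List Int} {v : Int} (h : ans.Nodup) (hv : v ∉ ans) :
    (ans ++ [v]).Nodup := by
  apply List.Nodup.append h (List.nodup_singleton v)
  intro a ha hmem
  rw [List.mem_singleton] at hmem
  exact hv (hmem ▸ ha)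

theorem foldA_spec (R : List Int) : ∀ (ans L : List Int), ans.Nodup → L.Nodup →
    (∀ x ∈ L, x ∉ ans) →
    ((R.foldl (fun st r =>
      if (r - 1) ∈ st.2 then (st.1 ++ [r - 1], (PySem.List.remove? st.2 (r - 1)).getD st.2)
      else if (r + 1) ∈ st.2 then (st.1 ++ [r + 1], (PySem.List.remove? st.2 (r + 1)).getD st.2)
      else st) (ans, L)).1.Nodup ∧
    (R.foldl (fun st r =>
      if (r - 1) ∈ st.2 then (st.1 ++ [r - 1], (PySem.List.remove? st.2 (r - 1)).getD st.2)
      else if (r + 1) ∈ st.2 then (st.1 ++ [r + 1], (PySem.List.remove? st.2 (r + 1)).getD st.2)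
      else st) (ans, L)).1.length = ans.length + gcount R L) := by
  induction R with
  | nil => intro ans L h1 h2 h3; simp [gcount]; exact h1
  | cons r rs ih =>
    intro ans L h1 h2 h3
    simp only [List.foldl_cons]
    by_cases c1 : (r - 1) ∈ L
    · rw [if_pos c1, PySem.List.remove?_eq_some_erase L _ c1]
      have hni : (r - 1) ∉ ans := h3 _ c1
      have h3' : ∀ x ∈ L.erase (r - 1), x ∉ ans ++ [r - 1] := by
        intro x hx
        have := (List.Nodup.mem_erase_iff h2).mp hx
        simp [h3 _ this.2, this.1]
      have := ih (ans ++ [r - 1]) (L.erase (r - 1)) (nodup_app_one h1 hni) (h2.erase _) h3'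
      simpa [gcount, c1, Nat.add_assoc, Nat.add_comm 1] using this
    · rw [if_neg c1]
      by_cases c2 : (r + 1) ∈ L
      · rw [if_pos c2, PySem.List.remove?_eq_some_erase L _ c2]
        have hni : (r + 1) ∉ ans := h3 _ c2
        have h3' : ∀ x ∈ L.erase (r + 1), x ∉ ans ++ [r + 1] := by
          intro x hx
          have := (List.Nodup.mem_erase_iff h2).mp hx
          simp [h3 _ this.2, this.1]
        have := ih (ans ++ [r + 1]) (L.erase (r + 1)) (nodup_app_one h1 hni) (h2.erase _) h3'
        simpa [gcount, c1, c2, Nat.add_assoc, Nat.add_comm 1] using this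
      · rw [if_neg c2]
        have := ih ans L h1 h2 h3
        simpa [gcount, c1, c2] using this

theorem pairwise_lt_of_le_nodup {l : List Int} (hle : l.Pairwise (· ≤ ·)) (hnd : l.Nodup) :
    l.Pairwise (· < ·) := by
  have := hle.and hnd
  exact this.imp (fun h => lt_of_le_of_ne h.1 h.2)

theorem filter_partition_length {α : Type} (l : List α) (p : α → Prop) [DecidablePred p] :
    (l.filter (fun x => decide (¬ p x))).length + (l.filter (fun x => decide (p x))).length = l.length := by
  induction l with
  | nil => simp
  | cons a t ih => by_cases h : p a <;> simp [h, ← ih] <;> omega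

-- ===== VERDICT (by name: the statement is the Claim_ definition above) =====
theorem solution_spec : Claim_equal_solution := by
  intro n lost reserve _
  unfold Spec_solution solution solution_alt
  simp only []
  have ndl : (PySem.Set.ofList lost).Nodup := PySem.Set.nodup_ofList lost
  have ndr : (PySem.Set.ofList reserve).Nodup := PySem.Set.nodup_ofList reserve
  -- the two lost / reserve lists of A and B coincide
  have hLeq : PySem.List.sorted (PySem.Set.diff (PySem.Set.ofList lost) (PySem.Set.inter (PySem.Set.ofList lost) (PySem.Set.ofList reserve))) (fun x => x) false
      = PySem.List.sorted (PySem.Set.diff (PySem.Set.ofList lost) (PySem.Set.ofList reserve)) (fun x => x) false := by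
    rw [PySem.List.sorted_id_eq_sorted_id_iff_perm]
    rw [List.perm_ext_iff_of_nodup (PySem.Set.nodup_diff _ _ ndl) (PySem.Set.nodup_diff _ _ ndl)]
    intro a
    simp only [PySem.Set.mem_diff, PySem.Set.mem_inter]
    tauto
  have hReq : PySem.List.sorted (PySem.Set.diff (PySem.Set.ofList reserve) (PySem.Set.inter (PySem.Set.ofList lost) (PySem.Set.ofList reserve))) (fun x => x) false
      = PySem.List.sorted (PySem.Set.diff (PySem.Set.ofList reserve) (PySem.Set.ofList lost)) (fun x => x) false := by
    rw [PySem.List.sorted_id_eq_sorted_id_iff_perm]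
    rw [List.perm_ext_iff_of_nodup (PySem.Set.nodup_diff _ _ ndr) (PySem.Set.nodup_diff _ _ ndr)]
    intro a
    simp only [PySem.Set.mem_diff, PySem.Set.mem_inter]
    tauto
  rw [hLeq, hReq]
  set L := PySem.List.sorted (PySem.Set.diff (PySem.Set.ofList lost) (PySem.Set.ofList reserve)) (fun x => x) false with hLdef
  set R := PySem.List.sorted (PySem.Set.diff (PySem.Set.ofList reserve) (PySem.Set.ofList lost)) (fun x => x) false with hRdef
  have hLperm := PySem.List.sorted_perm (PySem.Set.diff (PySem.Set.ofList lost) (PySem.Set.ofList reserve)) (fun x : Int => x) false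
  have hRperm := PySem.List.sorted_perm (PySem.Set.diff (PySem.Set.ofList reserve) (PySem.Set.ofList lost)) (fun x : Int => x) false
  have hLnd : L.Nodup := (hLperm.nodup_iff).mpr (PySem.Set.nodup_diff _ _ ndl)
  have hRnd : R.Nodup := (hRperm.nodup_iff).mpr (PySem.Set.nodup_diff _ _ ndr)
  have hLlt : L.Pairwise (· < ·) :=
    pairwise_lt_of_le_nodup (PySem.List.sorted_pairwise _ _) hLnd
  have hRlt : R.Pairwise (· < ·) :=
    pairwise_lt_of_le_nodup (PySem.List.sorted_pairwise _ _) hRnd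
  have hmemL : ∀ x : Int, x ∈ L ↔ x ∈ lost ∧ x ∉ reserve := by
    intro x
    rw [hLdef, PySem.List.mem_sorted, PySem.Set.mem_diff, PySem.Set.mem_ofList, PySem.Set.mem_ofList]
  have hmemR : ∀ x : Int, x ∈ R ↔ x ∈ reserve ∧ x ∉ lost := by
    intro x
    rw [hRdef, PySem.List.mem_sorted, PySem.Set.mem_diff, PySem.Set.mem_ofList, PySem.Set.mem_ofList]
  have hdisj : ∀ x ∈ L, x ∉ R := by
    intro x hx hr
    exact ((hmemL x).mp hx).2 ((hmemR x).mp hr).1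
  -- A's first loop is a filter of the range
  have flip : (fun (acc : List Int) (num : Int) => if num ∈ L then acc else acc ++ [num])
      = (fun (acc : List Int) (num : Int) => if num ∉ L then acc ++ [num] else acc) := by
    funext acc num; by_cases h : num ∈ L <;> simp [h]
  rw [flip, PySem.List.foldl_append_ite_eq_filter (fun num => num ∉ L)]
  rw [List.nil_append]
  set A1 := (PySem.List.pyRange 1 (n + 1)).filter (fun num => decide (num ∉ L)) with hA1def
  have hA1nd : A1.Nodup := List.Nodup.filter _ (PySem.List.nodup_pyRange_one 1 (n + 1))
  have hA1disj : ∀ x ∈ L, x ∉ A1 := by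
    intro x hx hmem
    have := List.of_mem_filter hmem
    simp at this
    exact this hx
  obtain ⟨hN, hlen⟩ := foldA_spec R A1 L hA1nd hLnd hA1disj
  rw [PySem.Set.ofList_eq_self_of_nodup _ hN, hlen]
  -- B's side
  rw [PySem.List.foldl_ite_add_one (fun x => 1 ≤ x ∧ x ≤ n) L 0]
  rw [tpGo_eq_tpc L R (L.length + R.length) 0 0 _ (by omega)]
  simp only [List.drop_zero]
  rw [← gcount_eq_tpc L R hLlt hRlt hdisj]
  -- arithmetic: |A1| = max n 0 - |L ∩ [1,n]|
  have hpart := filter_partition_length (PySem.List.pyRange 1 (n + 1)) (fun num => num ∉ L)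
  have hrlen : (PySem.List.pyRange 1 (n + 1)).length = (n + 1 - 1).toNat :=
    PySem.List.length_pyRange_one 1 (n + 1)
  have hcnt : (List.filter (fun x => decide (¬ x ∉ L)) (PySem.List.pyRange 1 (n + 1))).length
      = (List.filter (fun x => decide (1 ≤ x ∧ x ≤ n)) L).length := by
    have hperm : (List.filter (fun x => decide (¬ x ∉ L)) (PySem.List.pyRange 1 (n + 1))).Perm
        (List.filter (fun x => decide (1 ≤ x ∧ x ≤ n)) L) := by
      rw [List.perm_ext_iff_of_nodup
        (List.Nodup.filter _ (PySem.List.nodup_pyRange_one 1 (n + 1)))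
        (List.Nodup.filter _ hLnd)]
      intro a
      simp only [List.mem_filter, PySem.List.mem_pyRange_one, decide_eq_true_eq, not_not]
      constructor
      · rintro ⟨⟨h1, h2⟩, h3⟩; exact ⟨h3, h1, by omega⟩
      · rintro ⟨h1, h2, h3⟩; exact ⟨⟨h2, by omega⟩, h1⟩
    exact hperm.length_eq
  rw [List.countP_eq_length_filter]
  -- close with integer arithmetic over the counted lengths
  have hA1len : A1.length = (List.filter (fun num => decide (num ∉ L)) (PySem.List.pyRange 1 (n + 1))).length :=
    congrArg List.length hA1def
  rw [hcnt] at hpart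
  rw [← Int.toNat_eq_max]
  push_cast
  omega
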